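-- pv_equiv track=rewrite | github.com/SmallPepperZ/SachiBotPy | customfunctions/miscfunctions.py | find_flags
-- ===== SOURCE A (Python) =====
-- def find_flags(flags:list, args):
-- 	"""Returns a list of flags and a list of arguments from an invocation
--
-- 	Parameters
-- 	----------
-- 	flags : list
-- 		The flags to check for as a list. Will be returned if they are used.
-- 	args : list or tuple
-- 		The arguments to search for flags in.
--
-- 	Returns
-- 	-------
-- 	used flags : list
-- 		A list of flags that were used in the command. If none are used, will be an empty list
-- 	args : list
-- 		A list of all the arguments that were not flags
-- 	"""
-- 	used_flags:list = []
-- 	args = list(args)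
-- 	for flag in flags:
-- 		if flag in args:
-- 			args.pop(args.index(flag))
-- 			used_flags.append(flag)
-- 	return used_flags, args
-- ===== SOURCE B (Python) =====
-- def find_flags(flags, args):
--     avail = {}
--     for a in args:
--         avail[a] = avail.get(a, 0) + 1
--     used_flags = []
--     to_remove = {}
--     for flag in flags:
--         if to_remove.get(flag, 0) < avail.get(flag, 0):
--             to_remove[flag] = to_remove.get(flag, 0) + 1
--             used_flags.append(flag)
--     result = []
--     for a in args:
--         k = to_remove.get(a, 0)
--         if k > 0:
--             to_remove[a] = k - 1
--         else:
--             result.append(a)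
--     return used_flags, result
-- ===== Notes on version B (the rewrite author's own statement) =====
-- stated objective: faster
-- what changed: Replaces the per-flag linear membership/index/pop scans over a mutating args list with a count table of args, a per-value to-remove counter filled in one pass over flags, and a single rebuild pass over args that skips the first k occurrences of each scheduled value.
import Mathlib
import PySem

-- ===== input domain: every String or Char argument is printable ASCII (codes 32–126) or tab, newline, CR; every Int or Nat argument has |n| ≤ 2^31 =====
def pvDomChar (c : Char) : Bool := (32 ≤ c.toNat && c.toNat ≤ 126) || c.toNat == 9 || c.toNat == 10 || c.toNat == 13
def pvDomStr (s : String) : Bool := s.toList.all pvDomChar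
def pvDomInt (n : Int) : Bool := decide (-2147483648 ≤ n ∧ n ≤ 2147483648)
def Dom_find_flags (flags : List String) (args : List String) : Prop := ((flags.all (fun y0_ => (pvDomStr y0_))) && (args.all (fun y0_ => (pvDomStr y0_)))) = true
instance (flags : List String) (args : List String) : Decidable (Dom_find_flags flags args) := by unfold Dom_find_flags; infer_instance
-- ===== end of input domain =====

-- B replaces A's per-flag membership/index/pop scans with a count table, a
-- to-remove counter and one rebuild pass (objective: faster, asymptotically).

-- ===== PORT A =====
-- literal port of A: for each flag, 'if flag in args: args.pop(args.index(flag)); used_flags.append(flag)'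
def find_flags (flags : List String) (args : List String) : List String × List String :=
  flags.foldl (fun st flag =>
    if st.2.contains flag then
      match PySem.List.index? st.2 flag with
      | some i =>
        match PySem.List.pop? st.2 (i : Int) with
        | some r => (st.1 ++ [flag], r.2)
        | none => (st.1, st.2)
      | none => (st.1, st.2)
    else st) ([], args)

-- ===== PORT B =====
-- literal port of Source B: availability counts, one pass over flags filling a
-- to-remove table, then one rebuild pass over args skipping scheduled values
def find_flags_alt (flags : List String) (args : List String) : List String × List String :=
  let avail : PySem.Dict String Int :=
    args.foldl (fun d a => d.insert a (d.getD a 0 + 1)) PySem.Dict.empty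
  let ur : List String × PySem.Dict String Int :=
    flags.foldl (fun st flag =>
      if st.2.getD flag 0 < avail.getD flag 0 then
        (st.1 ++ [flag], st.2.insert flag (st.2.getD flag 0 + 1))
      else st) ([], PySem.Dict.empty)
  let res : PySem.Dict String Int × List String :=
    args.foldl (fun st a =>
      if 0 < st.1.getD a 0 then (st.1.insert a (st.1.getD a 0 - 1), st.2)
      else (st.1, st.2 ++ [a])) (ur.2, [])
  (ur.1, res.2)

-- ===== PRECONDITION & SPEC =====
def Spec_find_flags (flags : List String) (args : List String) (out : List String × List String) : Prop := out = find_flags_alt flags args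
instance (flags : List String) (args : List String) (out : List String × List String) : Decidable (Spec_find_flags flags args out) := by unfold Spec_find_flags; infer_instance

-- ===== CLAIM (what is proved, stated in full; the proofs are below) =====
def Claim_equal_find_flags : Prop := ∀ (flags : List String) (args : List String), Dom_find_flags flags args → Spec_find_flags flags args (find_flags flags args)

-- ===== LEMMAS AND PROOFS =====

-- model: a removal-budget function; pvStrip f drops, per value v, the first (f v) occurrences
def pvDec (f : String → Int) (a : String) : String → Int := fun v => if v = a then f v - 1 else f v
def pvInc (f : String → Int) (a : String) : String → Int := fun v => if v = a then f v + 1 else f v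

def pvStrip (f : String → Int) : List String → List String
  | [] => []
  | a :: t => if 0 < f a then pvStrip (pvDec f a) t else a :: pvStrip f t

-- reference step: what one iteration of A's loop does to (used, remaining args)
def pvRefStep (st : List String × List String) (flag : String) : List String × List String :=
  if flag ∈ st.2 then (st.1 ++ [flag], st.2.erase flag) else st

theorem pvStrip_zero (args : List String) : pvStrip (fun _ => 0) args = args := by
  induction args with
  | nil => rfl
  | cons a t ih => simp [pvStrip, ih]

theorem pvMem_strip (f : String → Int) (args : List String) (x : String)
    (hf : ∀ v, 0 ≤ f v) : x ∈ pvStrip f args ↔ f x < args.count x := by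
  induction args generalizing f with
  | nil => simpa [pvStrip] using not_lt.2 (hf x)
  | cons a t ih =>
    by_cases h : 0 < f a
    · have hf' : ∀ v, 0 ≤ pvDec f a v := by
        intro v; unfold pvDec; split_ifs with hv
        · subst hv; omega
        · exact hf v
      rw [pvStrip, if_pos h, ih _ hf']
      simp only [pvDec, List.count_cons, beq_iff_eq]
      by_cases hx : x = a
      · subst hx; simp only [if_pos rfl]; push_cast; omega
      · have hax : ¬ (x = a) := hx
        simp only [if_neg hax]
        push_cast
        split_ifs with h2
        · exact absurd h2.symm hax
        · omega
    · have ha : f a = 0 := le_antisymm (not_lt.1 h) (hf a)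
      rw [pvStrip, if_neg h]
      simp only [List.mem_cons, List.count_cons, beq_iff_eq]
      by_cases hx : x = a
      · subst hx
        simp only [if_pos rfl, ha, true_or, true_iff]
        push_cast; omega
      · have hax : ¬ (x = a) := hx
        simp only [if_neg hax, hx, false_or]
        rw [ih _ hf]
        push_cast
        split_ifs with h2
        · exact absurd h2.symm hax
        · omega

theorem pvStrip_inc (f : String → Int) (args : List String) (x : String)
    (hf : ∀ v, 0 ≤ f v) (hcnt : f x < args.count x) :
    pvStrip (pvInc f x) args = (pvStrip f args).erase x := by
  induction args generalizing f with
  | nil =>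
    exfalso; simp [List.count_nil] at hcnt
    exact absurd hcnt (not_lt.2 (hf x))
  | cons a t ih =>
    by_cases hax : a = x
    · subst hax
      by_cases h : 0 < f a
      · have hf' : ∀ v, 0 ≤ pvDec f a v := by
          intro v; unfold pvDec; split_ifs with hv
          · subst hv; omega
          · exact hf v
        have hcnt' : pvDec f a a < t.count a := by
          simp [pvDec]
          simp [List.count_cons] at hcnt
          omega
        have h1 : 0 < pvInc f a a := by simp [pvInc]; omega
        rw [pvStrip, if_pos h1, pvStrip, if_pos h]
        have e1 : pvDec (pvInc f a) a = pvInc (pvDec f a) a := by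
          funext v
          by_cases hv : v = a <;> simp [pvDec, pvInc, hv] <;> omega
        rw [e1, ih _ hf' hcnt']
      · have ha : f a = 0 := le_antisymm (not_lt.1 h) (hf a)
        have h1 : 0 < pvInc f a a := by simp [pvInc]; omega
        rw [pvStrip, if_pos h1, pvStrip, if_neg h]
        have e1 : pvDec (pvInc f a) a = f := by
          funext v; simp [pvDec, pvInc]; split_ifs with hv <;> simp [hv]
        rw [e1, List.erase_cons_head]
    · have hx : pvInc f x a = f a := by simp [pvInc, hax]
      have hcnt2 : f x < t.count x := by
        simpa [List.count_cons, hax] using hcnt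
      by_cases h : 0 < f a
      · have hf' : ∀ v, 0 ≤ pvDec f a v := by
          intro v; unfold pvDec; split_ifs with hv
          · subst hv; omega
          · exact hf v
        have hcnt' : pvDec f a x < (t.count x : Int) := by
          have hxa : ¬ (x = a) := fun h' => hax h'.symm
          simpa [pvDec, hxa] using hcnt2
        have h1 : 0 < pvInc f x a := by rw [hx]; exact h
        rw [pvStrip, if_pos h1, pvStrip, if_pos h]
        have e1 : pvDec (pvInc f x) a = pvInc (pvDec f a) x := by
          have hxa : ¬ x = a := fun h' => hax h'.symm
          funext v
          by_cases hv1 : v = a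
          · by_cases hv2 : v = x
            · exact absurd (hv1.symm.trans hv2) hax
            · simp [pvDec, pvInc, hv1, hv2, hax, hxa]
          · by_cases hv2 : v = x <;> simp [pvDec, pvInc, hv1, hv2, hax, hxa]
        rw [e1, ih _ hf' hcnt']
      · have h1 : ¬ 0 < pvInc f x a := by rw [hx]; exact h
        rw [pvStrip, if_neg h1, pvStrip, if_neg h]
        rw [List.erase_cons_tail (by simpa using hax)]
        rw [ih _ hf hcnt2]

theorem pvEraseIdx_append (pre suf : List String) (v : String) :
    (pre ++ v :: suf).eraseIdx pre.length = pre ++ suf := by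
  induction pre with
  | nil => rfl
  | cons p t ih => simpa using ih

theorem pvStepA (st : List String × List String) (flag : String) :
    (if st.2.contains flag then
      match PySem.List.index? st.2 flag with
      | some i =>
        match PySem.List.pop? st.2 (i : Int) with
        | some r => (st.1 ++ [flag], r.2)
        | none => (st.1, st.2)
      | none => (st.1, st.2)
    else st) = pvRefStep st flag := by
  by_cases hc : flag ∈ st.2
  · have hcont : st.2.contains flag = true := by simpa using hc
    rw [if_pos hcont]
    have hsome : (PySem.List.index? st.2 flag).isSome := (PySem.List.index?_isSome_iff _ _).2 hc
    obtain ⟨i, hi⟩ := Option.isSome_iff_exists.1 hsome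
    rw [hi]
    dsimp only
    obtain ⟨pre, suf, hdecomp, hlen, hnot⟩ := (PySem.List.index?_eq_some_iff _ _ _).1 hi
    have hilt : i < st.2.length := by
      rw [hdecomp, ← hlen]; simp
    rw [PySem.List.pop?_natCast st.2 i hilt]
    dsimp only
    unfold pvRefStep
    rw [if_pos hc]
    subst hlen
    rw [hdecomp, pvEraseIdx_append]
    have herase : (pre ++ flag :: suf).erase flag = pre ++ suf := by
      rw [List.erase_append_right _ (by simpa using hnot), List.erase_cons_head]
    rw [herase]
  · have hcont : ¬ st.2.contains flag = true := by simpa using hc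
    rw [if_neg hcont]
    unfold pvRefStep
    rw [if_neg hc]

theorem pvRebuild (args : List String) (rem : PySem.Dict String Int) (acc : List String) :
    (args.foldl (fun st a =>
      if 0 < st.1.getD a 0 then (st.1.insert a (st.1.getD a 0 - 1), st.2)
      else (st.1, st.2 ++ [a])) (rem, acc)).2
    = acc ++ pvStrip (fun v => rem.getD v 0) args := by
  induction args generalizing rem acc with
  | nil => simp [pvStrip]
  | cons a t ih =>
    simp only [List.foldl_cons]
    by_cases h : 0 < rem.getD a 0
    · rw [if_pos h, ih]
      have e1 : (fun v => (rem.insert a (rem.getD a 0 - 1)).getD v 0)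
          = pvDec (fun v => rem.getD v 0) a := by
        funext v; rw [PySem.Dict.getD_insert]
        by_cases hv : v = a
        · subst hv; simp [pvDec]
        · simp [pvDec, hv]
      rw [e1, pvStrip, if_pos h]
    · rw [if_neg h, ih, pvStrip, if_neg h]
      simp

theorem pvAvail (args : List String) (flag : String) :
    ((args.foldl (fun d a => d.insert a (d.getD a 0 + 1))
      (PySem.Dict.empty : PySem.Dict String Int)).getD flag 0) = (args.count flag : Int) := by
  rw [PySem.Dict.getD_foldl_insert_add_one]
  simp

theorem pvSim (args0 : List String) (cnt : PySem.Dict String Int)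
    (hcnt : ∀ v, cnt.getD v 0 = (args0.count v : Int)) (flags : List String) :
    ∀ (used : List String) (rem : PySem.Dict String Int), (∀ v, 0 ≤ rem.getD v 0) →
    (((flags.foldl (fun st flag =>
        if st.2.getD flag 0 < cnt.getD flag 0 then
          (st.1 ++ [flag], st.2.insert flag (st.2.getD flag 0 + 1))
        else st) (used, rem)).1,
      pvStrip (fun v => ((flags.foldl (fun st flag =>
        if st.2.getD flag 0 < cnt.getD flag 0 then
          (st.1 ++ [flag], st.2.insert flag (st.2.getD flag 0 + 1))
        else st) (used, rem)).2.getD v 0)) args0)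
      = flags.foldl pvRefStep (used, pvStrip (fun v => rem.getD v 0) args0))
    ∧ (∀ v, 0 ≤ ((flags.foldl (fun st flag =>
        if st.2.getD flag 0 < cnt.getD flag 0 then
          (st.1 ++ [flag], st.2.insert flag (st.2.getD flag 0 + 1))
        else st) (used, rem)).2.getD v 0)) := by
  induction flags with
  | nil => exact fun used rem hf => ⟨rfl, hf⟩
  | cons flag rest ih =>
    intro used rem hf
    simp only [List.foldl_cons]
    by_cases hg : rem.getD flag 0 < cnt.getD flag 0
    · rw [if_pos hg]
      have hmem : flag ∈ pvStrip (fun v => rem.getD v 0) args0 := by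
        rw [pvMem_strip _ _ _ hf]
        rw [hcnt flag] at hg
        exact hg
      have hf' : ∀ v, 0 ≤ (rem.insert flag (rem.getD flag 0 + 1)).getD v 0 := by
        intro v
        rw [PySem.Dict.getD_insert]
        split_ifs with hv
        · have := hf flag; omega
        · exact hf v
      have e1 : (fun v => (rem.insert flag (rem.getD flag 0 + 1)).getD v 0)
          = pvInc (fun v => rem.getD v 0) flag := by
        funext v; rw [PySem.Dict.getD_insert]
        by_cases hv : v = flag
        · subst hv; simp [pvInc]
        · simp [pvInc, hv]
      have hstrip : pvStrip (fun v => (rem.insert flag (rem.getD flag 0 + 1)).getD v 0) args0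
          = (pvStrip (fun v => rem.getD v 0) args0).erase flag := by
        rw [e1, pvStrip_inc _ _ _ hf (by rw [← hcnt flag]; exact hg)]
      have href : pvRefStep (used, pvStrip (fun v => rem.getD v 0) args0) flag
          = (used ++ [flag], pvStrip (fun v => (rem.insert flag (rem.getD flag 0 + 1)).getD v 0) args0) := by
        unfold pvRefStep
        rw [if_pos hmem, hstrip]
      rw [href]
      exact ih (used ++ [flag]) (rem.insert flag (rem.getD flag 0 + 1)) hf'
    · rw [if_neg hg]
      have hmem : flag ∉ pvStrip (fun v => rem.getD v 0) args0 := by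
        rw [pvMem_strip _ _ _ hf]
        rw [hcnt flag] at hg
        exact hg
      have href : pvRefStep (used, pvStrip (fun v => rem.getD v 0) args0) flag
          = (used, pvStrip (fun v => rem.getD v 0) args0) := by
        unfold pvRefStep
        rw [if_neg hmem]
      rw [href]
      exact ih used rem hf

theorem find_flags_spec : Claim_equal_find_flags := by
  intro flags args _
  unfold Spec_find_flags
  have hA : find_flags flags args = flags.foldl pvRefStep ([], args) := by
    unfold find_flags
    exact PySem.List.foldl_congr_mem _ _ _ _ (fun st flag _ => pvStepA st flag)
  have hB : find_flags_alt flags args = flags.foldl pvRefStep ([], args) := by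
    simp only [find_flags_alt]
    have hf0 : ∀ v, 0 ≤ (PySem.Dict.empty : PySem.Dict String Int).getD v 0 := by
      intro v; simp
    have hsim := pvSim args
      (args.foldl (fun d a => d.insert a (d.getD a 0 + 1)) PySem.Dict.empty)
      (fun v => pvAvail args v) flags [] PySem.Dict.empty hf0
    have e0 : pvStrip (fun v => (PySem.Dict.empty : PySem.Dict String Int).getD v 0) args = args := by
      have : (fun v => (PySem.Dict.empty : PySem.Dict String Int).getD v 0) = (fun _ => (0 : Int)) := by
        funext v; simp
      rw [this, pvStrip_zero]
    rw [e0] at hsim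
    rw [pvRebuild]
    simp only [List.nil_append]
    exact hsim.1
  rw [hA, hB]
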